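-- pv_equiv track=rewrite | github.com/hbrunie/tvm_ttile | ttile/conv2d/tensorize/parser.py | schedule_down
-- ===== SOURCE A (Python) =====
-- convert_axes = {
--     "F": "axe_out_channels",
--     "C": "axe_in_channels",
--     "X": "axe_xx",
--     "Y": "axe_yy",
--     "W": "axe_w",
--     "H": "axe_h",
-- }
--
-- def sort_reduction_down(out_tensorize):
--     """
--     Sort the array out_tensorize with all reduction axes at the end
--     """
--     out_tensorize_ = []
--     out_tensorize_rec = []
--     for k in range(len(out_tensorize)):
--         if out_tensorize[k][0] == "C" or out_tensorize[k][0] == "H" or out_tensorize[k][0] == "W":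
--             out_tensorize_rec.append(out_tensorize[k])
--         else:
--             out_tensorize_.append(out_tensorize[k])
--     for k in range(len(out_tensorize_rec)):
--         out_tensorize_.append(out_tensorize_rec[k])
--     return out_tensorize_
--
-- def schedule_down(out_tensorize, in_tensorize, suffix):
--     """
--     Give the schedule of the convolution
--     """
--     counter = {
--         "F":0,
--         "C":0,
--         "X":0,
--         "Y":0,
--         "H":0,
--         "W":0
--     }
--     out_tensorize = sort_reduction_down(out_tensorize)
--     l = out_tensorize + in_tensorize
--     schedule_ = []
--     for k, element in enumerate(l):
--         schedule_.append(convert_axes[element[0]] + suffix + "_" + str(counter[element[0]]))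
--         counter[element[0]] += 1
--     return schedule_
-- ===== SOURCE B (Python) =====
-- convert_axes = {
--     "F": "axe_out_channels",
--     "C": "axe_in_channels",
--     "X": "axe_xx",
--     "Y": "axe_yy",
--     "W": "axe_w",
--     "H": "axe_h",
-- }
--
-- def schedule_down(out_tensorize, in_tensorize, suffix):
--     """
--     Give the schedule of the convolution (reduction axes of out_tensorize last,
--     via one stable sort instead of a two-pass partition).
--     """
--     ordered = sorted(out_tensorize, key=lambda e: e[0] in ("C", "H", "W")) + in_tensorize
--     counts = {}
--     labels = []
--     for element in ordered:
--         axis = element[0]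
--         name = convert_axes[axis]
--         n = counts.get(axis, 0)
--         counts[axis] = n + 1
--         labels.append(name + suffix + "_" + str(n))
--     return labels
-- ===== Notes on version B (the rewrite author's own statement) =====
-- stated objective: simpler
-- what changed: The two-pass append-partition helper sort_reduction_down is replaced by a single stable sort on the boolean key 'is reduction axis', and the fixed six-key counter dict is replaced by an empty dict grown with get-default, removing the helper function entirely.
import Mathlib
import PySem

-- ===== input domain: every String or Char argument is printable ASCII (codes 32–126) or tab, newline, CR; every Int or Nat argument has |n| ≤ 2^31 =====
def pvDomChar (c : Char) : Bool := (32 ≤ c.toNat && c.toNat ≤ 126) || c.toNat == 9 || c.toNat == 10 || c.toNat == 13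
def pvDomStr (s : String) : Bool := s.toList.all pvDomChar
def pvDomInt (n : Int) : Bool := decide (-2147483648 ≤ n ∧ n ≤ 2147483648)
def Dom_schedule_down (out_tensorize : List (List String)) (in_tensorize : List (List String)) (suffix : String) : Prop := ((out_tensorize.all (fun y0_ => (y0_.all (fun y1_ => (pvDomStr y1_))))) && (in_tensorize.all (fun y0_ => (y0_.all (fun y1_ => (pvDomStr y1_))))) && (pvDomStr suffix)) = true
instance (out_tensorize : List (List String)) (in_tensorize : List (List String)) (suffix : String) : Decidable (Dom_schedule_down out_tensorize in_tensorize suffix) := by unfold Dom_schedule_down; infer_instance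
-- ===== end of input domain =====

-- B replaces A's two-pass append-partition of reduction axes by one stable boolean-key sort
-- and grows the counter dict from empty with a get-default, dropping the helper (simpler).


-- shared module constant: the convert_axes dict
def convert_axes : PySem.Dict String String :=
  PySem.Dict.ofList [("F", "axe_out_channels"), ("C", "axe_in_channels"), ("X", "axe_xx"),
                     ("Y", "axe_yy"), ("W", "axe_w"), ("H", "axe_h")]

-- Python's element[0] on a list of strings; Pre_ guarantees the list is nonempty
-- (on an empty element Python raises IndexError, excluded by Pre_), so the "" default is never the value used.
def head0 (e : List String) : String := (PySem.List.pyGet? e 0).getD ""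

-- ===== PORT A =====
-- sort_reduction_down: two accumulators filled in one pass, then the reduction list appended element by element
def sort_reduction_down (out_tensorize : List (List String)) : List (List String) :=
  let p := out_tensorize.foldl
    (fun (acc : List (List String) × List (List String)) e =>
      if head0 e == "C" || head0 e == "H" || head0 e == "W"
      then (acc.1, acc.2 ++ [e]) else (acc.1 ++ [e], acc.2))
    ([], [])
  p.2.foldl (fun acc e => acc ++ [e]) p.1

-- counter[x] and convert_axes[x] are KeyError on missing keys in Python; Pre_ keeps every
-- head among the six keys, so the getD defaults are never the value used.
def schedule_down (out_tensorize : List (List String)) (in_tensorize : List (List String)) (suffix : String) : List String :=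
  let counter0 : PySem.Dict String Int :=
    PySem.Dict.ofList [("F", 0), ("C", 0), ("X", 0), ("Y", 0), ("H", 0), ("W", 0)]
  let l := sort_reduction_down out_tensorize ++ in_tensorize
  (l.foldl
    (fun (acc : List String × PySem.Dict String Int) e =>
      (acc.1 ++ [convert_axes.getD (head0 e) "" ++ suffix ++ "_" ++ PySem.Int.toStr (acc.2.getD (head0 e) 0)],
       acc.2.insert (head0 e) (acc.2.getD (head0 e) 0 + 1)))
    ([], counter0)).1

-- ===== PORT B =====
def isRed (a : String) : Bool := a == "C" || a == "H" || a == "W"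

def schedule_down_alt (out_tensorize : List (List String)) (in_tensorize : List (List String)) (suffix : String) : List String :=
  let ordered := PySem.List.sorted out_tensorize (fun e => isRed (head0 e)) ++ in_tensorize
  (ordered.foldl
    (fun (acc : List String × PySem.Dict String Int) element =>
      let axis := head0 element
      let name := convert_axes.getD axis ""   -- convert_axes[axis]; Pre_ keeps axis among the keys
      let n := acc.2.getD axis 0              -- counts.get(axis, 0)
      (acc.1 ++ [name ++ suffix ++ "_" ++ PySem.Int.toStr n], acc.2.insert axis (n + 1)))
    ([], PySem.Dict.empty)).1

-- ===== PRECONDITION & SPEC =====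
def isKey (a : String) : Bool :=
  a == "F" || a == "C" || a == "X" || a == "Y" || a == "H" || a == "W"

-- Pre_: Python raises IndexError on an empty element and KeyError on a first entry outside
-- convert_axes' six keys; exactly those inputs are excluded (head0 e is a key iff e is nonempty
-- and its first string is one of the six axis letters).
def Pre_schedule_down (out_tensorize : List (List String)) (in_tensorize : List (List String)) (suffix : String) : Prop :=
  ((out_tensorize ++ in_tensorize).all (fun e => isKey (head0 e))) = true
instance (out_tensorize : List (List String)) (in_tensorize : List (List String)) (suffix : String) : Decidable (Pre_schedule_down out_tensorize in_tensorize suffix) := by unfold Pre_schedule_down; infer_instance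

def pvWitness_schedule_down : List (List String) × List (List String) × String :=
  ([["X", "2"], ["C", "3"], ["F", "1"]], [["C", "5"], ["Y"]], "_o")

def Spec_schedule_down (out_tensorize : List (List String)) (in_tensorize : List (List String)) (suffix : String) (out : List String) : Prop := out = schedule_down_alt out_tensorize in_tensorize suffix
instance (out_tensorize : List (List String)) (in_tensorize : List (List String)) (suffix : String) (out : List String) : Decidable (Spec_schedule_down out_tensorize in_tensorize suffix out) := by unfold Spec_schedule_down; infer_instance

-- ===== CLAIM (what is proved, stated in full; the proofs are below) =====
def Claim_equal_schedule_down : Prop := ∀ (out_tensorize : List (List String)) (in_tensorize : List (List String)) (suffix : String), Dom_schedule_down out_tensorize in_tensorize suffix → Pre_schedule_down out_tensorize in_tensorize suffix → Spec_schedule_down out_tensorize in_tensorize suffix (schedule_down out_tensorize in_tensorize suffix)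

-- ===== LEMMAS AND PROOFS =====

-- Inserting a key-false element into "all-false ++ all-true" puts it exactly in the middle.
theorem insertBy_mid {α : Type} (before : α → α → Bool) (x : α) (F T : List α)
    (hF : ∀ y ∈ F, before x y = false) (hT : ∀ y ∈ T, before x y = true) :
    PySem.List.insertBy before x (F ++ T) = F ++ x :: T := by
  induction F with
  | nil =>
      cases T with
      | nil => rfl
      | cons t ts => simp [PySem.List.insertBy, hT t (by simp)]
  | cons f fs ih =>
      simp only [List.cons_append, PySem.List.insertBy, hF f (by simp)]
      simp only [Bool.false_eq_true, if_false, List.cons.injEq, true_and]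
      exact ih (fun y hy => hF y (by simp [hy]))

-- The foldl behind a stable sort on a Bool key partitions: falses (in order) then trues (in order).
theorem foldl_insertBy_bool {α : Type} (key : α → Bool) (xs : List α) :
    ∀ (F T : List α), (∀ y ∈ F, key y = false) → (∀ y ∈ T, key y = true) →
    xs.foldl (fun acc x => PySem.List.insertBy (fun a b => decide (key a < key b)) x acc) (F ++ T)
      = (F ++ xs.filter (fun x => !key x)) ++ (T ++ xs.filter key) := by
  induction xs with
  | nil => intro F T _ _; simp
  | cons x rest ih =>
      intro F T hF hT
      by_cases hx : key x = true
      · have hstep : PySem.List.insertBy (fun a b => decide (key a < key b)) x (F ++ T)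
            = (F ++ T) ++ [x] := by
          apply PySem.List.insertBy_of_forall_not_before
          intro y _; simp [hx]
        have : (F ++ T) ++ [x] = F ++ (T ++ [x]) := by simp
        simp only [List.foldl_cons, hstep, this]
        rw [ih F (T ++ [x]) hF (by intro y hy; rcases List.mem_append.1 hy with h | h
                                   · exact hT y h
                                   · simp at h; subst h; exact hx)]
        simp [hx]
      · have hx' : key x = false := by simpa using hx
        have hstep : PySem.List.insertBy (fun a b => decide (key a < key b)) x (F ++ T)
            = F ++ x :: T := by
          apply insertBy_mid
          · intro y hy; simp [hx', hF y hy]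
          · intro y hy; simp [hx', hT y hy]
        have : F ++ x :: T = (F ++ [x]) ++ T := by simp
        simp only [List.foldl_cons, hstep, this]
        rw [ih (F ++ [x]) T (by intro y hy; rcases List.mem_append.1 hy with h | h
                                · exact hF y h
                                · simp at h; subst h; exact hx') hT]
        simp [hx']

theorem sorted_bool_partition {α : Type} (key : α → Bool) (xs : List α) :
    PySem.List.sorted xs key = xs.filter (fun x => !key x) ++ xs.filter key := by
  rw [PySem.List.sorted_eq_foldl_insertBy]
  simpa using foldl_insertBy_bool key xs [] [] (by simp) (by simp)

-- A's one-pass pair accumulator is the same partition.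
theorem pairFold_partition (xs : List (List String)) :
    ∀ (a b : List (List String)),
    xs.foldl (fun (acc : List (List String) × List (List String)) e =>
        if head0 e == "C" || head0 e == "H" || head0 e == "W"
        then (acc.1, acc.2 ++ [e]) else (acc.1 ++ [e], acc.2)) (a, b)
      = (a ++ xs.filter (fun e => !isRed (head0 e)), b ++ xs.filter (fun e => isRed (head0 e))) := by
  induction xs with
  | nil => intro a b; simp
  | cons x rest ih =>
      intro a b
      by_cases hx : isRed (head0 x) = true
      · have hc : (head0 x == "C" || head0 x == "H" || head0 x == "W") = true := by
          simpa [isRed] using hx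
        simp only [List.foldl_cons, hc, if_true, ih, List.filter_cons, hx]
        simp
      · have hx' : isRed (head0 x) = false := by simpa using hx
        have hc : (head0 x == "C" || head0 x == "H" || head0 x == "W") = false := by
          simpa [isRed] using hx'
        simp only [List.foldl_cons, hc, Bool.false_eq_true, if_false, ih, List.filter_cons, hx']
        simp

theorem foldl_append_singletons (b : List (List String)) :
    ∀ a : List (List String), b.foldl (fun acc e => acc ++ [e]) a = a ++ b := by
  induction b with
  | nil => intro a; simp
  | cons x rest ih => intro a; simp [List.foldl_cons, ih, List.append_assoc]

theorem sort_reduction_down_eq_sorted (xs : List (List String)) :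
    sort_reduction_down xs = PySem.List.sorted xs (fun e => isRed (head0 e)) := by
  rw [sorted_bool_partition]
  unfold sort_reduction_down
  rw [pairFold_partition xs [] []]
  simp only [List.nil_append]
  exact foldl_append_singletons _ _

-- The two label loops agree whenever the two counter dicts agree on all six keys.
theorem loop_eq (suffix : String) (l : List (List String)) :
    ∀ (acc : List String) (dA dB : PySem.Dict String Int),
    (∀ e ∈ l, isKey (head0 e) = true) →
    (∀ a : String, isKey a = true → dA.getD a 0 = dB.getD a 0) →
    (l.foldl (fun (acc : List String × PySem.Dict String Int) e =>
        (acc.1 ++ [convert_axes.getD (head0 e) "" ++ suffix ++ "_" ++ PySem.Int.toStr (acc.2.getD (head0 e) 0)],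
         acc.2.insert (head0 e) (acc.2.getD (head0 e) 0 + 1))) (acc, dA)).1
    = (l.foldl (fun (acc : List String × PySem.Dict String Int) element =>
        let axis := head0 element
        let name := convert_axes.getD axis ""
        let n := acc.2.getD axis 0
        (acc.1 ++ [name ++ suffix ++ "_" ++ PySem.Int.toStr n], acc.2.insert axis (n + 1))) (acc, dB)).1 := by
  induction l with
  | nil => intro acc dA dB _ _; rfl
  | cons e rest ih =>
      intro acc dA dB hmem hagree
      have hkey : isKey (head0 e) = true := hmem e (by simp)
      have hn : dA.getD (head0 e) 0 = dB.getD (head0 e) 0 := hagree _ hkey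
      simp only [List.foldl_cons, hn]
      exact ih _ _ _ (fun x hx => hmem x (by simp [hx]))
        (fun a ha => by
          rw [PySem.Dict.getD_insert, PySem.Dict.getD_insert]
          split_ifs with h
          · rfl
          · exact hagree a ha)

-- The six keys all start at 0 in both counters.
theorem init_agree (a : String) (ha : isKey a = true) :
    (PySem.Dict.ofList [("F", (0:Int)), ("C", 0), ("X", 0), ("Y", 0), ("H", 0), ("W", 0)]).getD a 0
      = (PySem.Dict.empty : PySem.Dict String Int).getD a 0 := by
  have : ((((a = "F" ∨ a = "C") ∨ a = "X") ∨ a = "Y") ∨ a = "H") ∨ a = "W" := by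
    simpa [isKey] using ha
  rcases this with ((((h | h) | h) | h) | h) | h <;> subst h <;> decide

-- ===== VERDICT (by name: the statement is the Claim_ definition above) =====
theorem schedule_down_spec : Claim_equal_schedule_down := by
  intro out_tensorize in_tensorize suffix _ hpre
  unfold Spec_schedule_down schedule_down schedule_down_alt
  rw [sort_reduction_down_eq_sorted]
  apply loop_eq
  · intro e he
    have he' : e ∈ out_tensorize ++ in_tensorize := by
      rcases List.mem_append.1 he with h | h
      · exact List.mem_append.2 (Or.inl ((PySem.List.mem_sorted _ _ _ _).1 h))
      · exact List.mem_append.2 (Or.inr h)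
    exact List.all_eq_true.1 hpre e he'
  · exact init_agree
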